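-- pv_equiv track=rewrite | github.com/jelmer/subvertpy | changes.py | changes_root
-- ===== SOURCE A (Python) =====
-- def changes_root(paths):
--     """Find the root path that was changed.
--
--     If there is more than one root, returns None
--     """
--     if paths == []:
--         return None
--     paths = sorted(paths)
--     root = paths[0]
--     for p in paths[1:]:
--         if p.startswith("%s/" % root): # new path is child of root
--             continue
--         elif root.startswith("%s/" % p): # new path is parent of root
--             root = p
--         else:
--             return None # Mismatch
--     return root
-- ===== SOURCE B (Python) =====
-- def changes_root(paths):
--     """Find the root path that was changed.
--
--     If there is more than one root, returns None
--     """
--     if not paths: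
--         return None
--     root = min(paths)
--     if paths.count(root) == 1 and all(p.startswith(root + "/") for p in paths if p != root):
--         return root
--     return None
-- ===== Notes on version B (the rewrite author's own statement) =====
-- stated objective: faster
-- what changed: Replaces the full sort + sequential scan (with a parent-update branch) by a min() pass plus a count and a filtered all() comprehension over the original unsorted list.
import Mathlib
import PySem

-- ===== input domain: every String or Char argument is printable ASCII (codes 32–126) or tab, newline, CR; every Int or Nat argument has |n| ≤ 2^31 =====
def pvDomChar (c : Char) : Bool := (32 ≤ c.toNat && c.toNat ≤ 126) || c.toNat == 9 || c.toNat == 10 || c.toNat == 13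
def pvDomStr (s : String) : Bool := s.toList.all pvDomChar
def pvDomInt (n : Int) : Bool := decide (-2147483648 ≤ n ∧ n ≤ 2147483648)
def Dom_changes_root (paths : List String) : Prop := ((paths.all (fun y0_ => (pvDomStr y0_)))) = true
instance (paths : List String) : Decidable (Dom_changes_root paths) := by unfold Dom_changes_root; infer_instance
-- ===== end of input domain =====

-- B replaces A's full sort (then scan of the sorted tail with a parent-update branch)
-- by one min() pass plus a count and a filtered all(): same result, O(n·L) instead of O(n log n·L).


-- ===== PORT A =====
-- A's for-loop over paths[1:] with early 'return None'; root is the running accumulator.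
def changesLoopA : String → List String → Option String
  | root, [] => some root
  | root, p :: rest =>
    if PySem.Chars.startswith p.toList (root.toList ++ ['/']) then  -- p is child of root
      changesLoopA root rest
    else if PySem.Chars.startswith root.toList (p.toList ++ ['/']) then  -- p is parent of root
      changesLoopA p rest
    else
      none  -- mismatch

def changes_root (paths : List String) : Option String :=
  if paths = [] then none
  else
    match PySem.List.sorted paths (fun x => x) false with
    | [] => none  -- unreachable: sorted of a nonempty list is nonempty
    | root :: rest => changesLoopA root rest

-- ===== PORT B =====
-- min(), then paths.count(root) and a filtered all() comprehension; no sequential state.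
def changes_root_alt (paths : List String) : Option String :=
  if paths = [] then none
  else
    match PySem.List.min? paths (fun x => x) with
    | none => none  -- unreachable: min of a nonempty list exists
    | some root =>
      if PySem.List.count paths root = 1 ∧
          ((paths.filter (fun p => p ≠ root)).all
            (fun p => PySem.Str.startswith p (root ++ "/"))) then
        some root
      else none

-- ===== PRECONDITION & SPEC =====
def Spec_changes_root (paths : List String) (out : Option String) : Prop := out = changes_root_alt paths
instance (paths : List String) (out : Option String) : Decidable (Spec_changes_root paths out) := by unfold Spec_changes_root; infer_instance

-- ===== CLAIM (what is proved, stated in full; the proofs are below) =====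
def Claim_equal_changes_root : Prop := ∀ (paths : List String), Dom_changes_root paths → Spec_changes_root paths (changes_root paths)

-- ===== LEMMAS AND PROOFS =====

-- 'p is a child of root', the test both programs share
def isChild (root p : String) : Bool := PySem.Chars.startswith p.toList (root.toList ++ ['/'])

-- a strict extension in a lexicographic order is strictly larger
lemma lt_of_append_singleton_prefix (p r : String) (c : Char)
    (h : (p.toList ++ [c]) <+: r.toList) : p < r := by
  obtain ⟨t, ht⟩ := h
  rw [String.lt_iff_toList_lt]
  have hlex : List.Lex (· < ·) p.toList (p.toList ++ (c :: t)) := by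
    simpa using List.Lex.append_left (· < ·) List.Lex.nil p.toList
  rw [show r.toList = p.toList ++ (c :: t) by rw [← ht]; simp]
  exact (Eq.to_iff rfl).mpr hlex

lemma isChild_self (r : String) : isChild r r = false := by
  rw [Bool.eq_false_iff]
  intro h
  rw [isChild, PySem.Chars.startswith_iff] at h
  have := h.length_le
  simp at this

-- A's loop, when root is ≤ every later element: the parent branch is dead
lemma loopA_char (r : String) (l : List String) (hmin : ∀ p ∈ l, r ≤ p) :
    changesLoopA r l = if l.all (isChild r) then some r else none := by
  induction l with
  | nil => simp [changesLoopA]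
  | cons p rest ih =>
    by_cases hc : isChild r p
    · simp only [changesLoopA, isChild] at hc ⊢
      rw [if_pos hc]
      rw [ih (fun q hq => hmin q (by simp [hq]))]
      simp [isChild, hc]
    · have hr : r ≤ p := hmin p (by simp)
      have hpar : ¬ PySem.Chars.startswith r.toList (p.toList ++ ['/']) = true := by
        rw [PySem.Chars.startswith_iff]
        intro hpre
        exact absurd (lt_of_append_singleton_prefix p r '/' hpre) (not_lt.mpr hr)
      simp only [changesLoopA, isChild] at hc ⊢
      rw [if_neg hc, if_neg hpar]
      simp [isChild, hc]

-- the head of sorted(paths) is min(paths)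
lemma head_sorted_eq_min (paths : List String) (r : String) (rest : List String)
    (h : PySem.List.sorted paths (fun x => x) false = r :: rest) :
    PySem.List.min? paths (fun x => x) = some r := by
  have hrmem : r ∈ paths := by
    have := PySem.List.sorted_perm paths (fun x => x) false
    exact this.mem_iff.mp (by rw [h]; simp)
  obtain ⟨m, hm⟩ : ∃ m, PySem.List.min? paths (fun x => x) = some m := by
    cases hmin : PySem.List.min? paths (fun x => x) with
    | none =>
      rw [PySem.List.min?_eq_none_iff] at hmin
      rw [hmin] at h
      rw [show PySem.List.sorted ([] : List String) (fun x => x) false = [] from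
        (PySem.List.sorted_eq_nil_iff _ _ _).mpr rfl] at h
      exact absurd h (by simp)
    | some m => exact ⟨m, rfl⟩
  have hmmem : m ∈ paths := PySem.List.min?_mem hm
  have h1 : r ≤ m := PySem.List.key_head_sorted_le paths (fun x => x) h m hmmem
  have h2 : m ≤ r := PySem.List.min?_isMin hm r hrmem
  rw [hm, le_antisymm h2 h1]

-- B's success condition is A's tail condition, through the permutation sorted(paths) ~ paths
lemma cond_iff (paths : List String) (r : String) (rest : List String)
    (hperm : paths.Perm (r :: rest)) :
    (rest.all (isChild r) = true) ↔
      (PySem.List.count paths r = 1 ∧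
        ((paths.filter (fun p => p ≠ r)).all
          (fun p => PySem.Str.startswith p (r ++ "/"))) = true) := by
  have hcount : paths.count r = rest.count r + 1 := by
    rw [hperm.count_eq, List.count_cons_self]
  constructor
  · intro hall
    have hcz : rest.count r = 0 := by
      rw [List.count_eq_zero]
      intro hmem
      have h2 := (List.all_eq_true.mp hall) r hmem
      rw [isChild_self] at h2
      exact absurd h2 (by simp)
    refine ⟨by simp [PySem.List.count_eq]; omega, ?_⟩
    rw [List.all_eq_true]
    intro q hq
    obtain ⟨hqp, hqr⟩ := List.mem_filter.mp hq
    simp only [ne_eq, decide_eq_true_eq] at hqr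
    rcases List.mem_cons.mp (hperm.mem_iff.mp hqp) with h | h
    · exact absurd h hqr
    · have := (List.all_eq_true.mp hall) q h
      simpa [PySem.Str.startswith_eq, isChild] using this
  · rintro ⟨hc1, hall⟩
    rw [List.all_eq_true]
    intro q hq
    have hqp : q ∈ paths := hperm.mem_iff.mpr (by simp [hq])
    by_cases hqr : q = r
    · exfalso
      have : 1 ≤ rest.count r := List.one_le_count_iff.mpr (hqr ▸ hq)
      rw [PySem.List.count_eq] at hc1
      omega
    · have := (List.all_eq_true.mp hall) q (List.mem_filter.mpr ⟨hqp, by simp [hqr]⟩)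
      simpa [PySem.Str.startswith_eq, isChild] using this

-- ===== VERDICT (by name: the statement is the Claim_ definition above) =====
theorem changes_root_spec : Claim_equal_changes_root := by
  intro paths _
  unfold Spec_changes_root changes_root changes_root_alt
  by_cases hnil : paths = []
  · simp [hnil]
  · rw [if_neg hnil, if_neg hnil]
    cases hs : PySem.List.sorted paths (fun x => x) false with
    | nil =>
      rw [PySem.List.sorted_eq_nil_iff] at hs
      exact absurd hs hnil
    | cons r rest =>
      rw [head_sorted_eq_min paths r rest hs]
      show changesLoopA r rest =
        if PySem.List.count paths r = 1 ∧
            ((paths.filter (fun p => p ≠ r)).all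
              (fun p => PySem.Str.startswith p (r ++ "/"))) then some r else none
      have hperm : paths.Perm (r :: rest) :=
        (PySem.List.sorted_perm paths (fun x => x) false).symm.trans (by rw [hs])
      have hmin : ∀ p ∈ rest, r ≤ p := fun p hp =>
        PySem.List.key_head_sorted_le paths (fun x => x) hs p (hperm.mem_iff.mpr (by simp [hp]))
      rw [loopA_char r rest hmin]
      by_cases hall : rest.all (isChild r)
      · rw [if_pos hall, if_pos ((cond_iff paths r rest hperm).mp hall)]
      · rw [if_neg hall,
          if_neg (fun hc => hall ((cond_iff paths r rest hperm).mpr ⟨hc.1, hc.2⟩))]
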